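-- pv_equiv track=rewrite | github.com/c788630/Numclass | utility.py | filter_maximal_intersections
-- ===== SOURCE A (Python) =====
-- def filter_maximal_intersections(classes, intersection_label_to_atomic):
--     """
--     For all present intersections, only keep the most specific (maximal) ones.
--     Suppress smaller intersections (their atomic components are a proper subset).
--     Preserves order and details.
--     """
--     labels = [item['label'] for item in classes]
--     keep = set(labels)
--     # Find all intersection labels present
--     present_inters = [lbl for lbl in labels if lbl in intersection_label_to_atomic]
--     # Compare all pairs of intersection labels present
--     for a in present_inters:
--         atoms_a = set(intersection_label_to_atomic[a])
--         for b in present_inters: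
--             if a == b:
--                 continue
--             atoms_b = set(intersection_label_to_atomic[b])
--             # If a is a proper subset of b, and both present, suppress a
--             if atoms_a < atoms_b:  # strictly smaller
--                 keep.discard(a)
--     # Now remove all atomic labels that are part of any kept intersection
--     for inter in list(keep):
--         if inter in intersection_label_to_atomic:
--             for atom in intersection_label_to_atomic[inter]:
--                 keep.discard(atom)
--     # Rebuild the class list, preserving original order
--     return [item for item in classes if item['label'] in keep]
-- ===== SOURCE B (Python) =====
-- def filter_maximal_intersections(classes, intersection_label_to_atomic):
--     # Sort present intersection labels by descending atom-set size and sweep once,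
--     # keeping accepted maximal atom-sets; suppress labels properly contained in one.
--     atoms = {}
--     for item in classes:
--         lbl = item['label']
--         if lbl not in atoms and lbl in intersection_label_to_atomic:
--             atoms[lbl] = frozenset(intersection_label_to_atomic[lbl])
--     order = sorted(atoms, key=lambda l: len(atoms[l]), reverse=True)
--     maximal = []
--     suppressed = set()
--     for lbl in order:
--         s = atoms[lbl]
--         if any(s < t for t in maximal):
--             suppressed.add(lbl)
--         else:
--             maximal.append(s)
--     dropped = set(suppressed)
--     for lbl, s in atoms.items():
--         if lbl not in suppressed:
--             dropped.update(s)
--     return [item for item in classes if item['label'] not in dropped]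
-- ===== Notes on version B (the rewrite author's own statement) =====
-- stated objective: alternative
-- what changed: Replaces the all-pairs proper-subset loop over the (duplicate-carrying) present-label list by a dict of first-seen atom-sets sorted by descending size and a single sweep against a running list of accepted maximal sets, then drops suppressed labels and atoms of kept intersections in one set-difference filter.
import Mathlib
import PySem

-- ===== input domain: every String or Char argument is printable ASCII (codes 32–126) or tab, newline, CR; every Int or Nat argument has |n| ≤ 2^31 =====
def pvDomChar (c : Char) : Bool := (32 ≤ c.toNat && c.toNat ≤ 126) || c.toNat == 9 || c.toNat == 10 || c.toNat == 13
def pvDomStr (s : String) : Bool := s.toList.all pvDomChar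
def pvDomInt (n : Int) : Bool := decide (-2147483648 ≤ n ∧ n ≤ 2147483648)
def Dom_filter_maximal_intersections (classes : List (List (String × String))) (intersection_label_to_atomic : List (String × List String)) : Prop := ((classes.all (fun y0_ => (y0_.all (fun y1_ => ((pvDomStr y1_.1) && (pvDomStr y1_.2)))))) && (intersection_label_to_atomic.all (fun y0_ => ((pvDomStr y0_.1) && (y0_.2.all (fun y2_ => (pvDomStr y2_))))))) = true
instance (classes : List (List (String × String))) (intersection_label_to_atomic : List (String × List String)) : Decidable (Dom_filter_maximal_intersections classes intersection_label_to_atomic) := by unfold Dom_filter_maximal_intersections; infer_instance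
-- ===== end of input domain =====

-- B replaces A's all-pairs proper-subset loop by a size-sorted single sweep against accepted
-- maximal atom-sets (objective: alternative); the RETURN values are proved equal on inputs
-- where every class dict has a 'label' key.

-- shared helpers: item['label'], 'lbl in d', d[lbl], frozenset proper subset (s < t)
def pvLab (item : List (String × String)) : String :=
  ((PySem.Dict.mk item).get? "label").getD ""
def pvHasKey (d : List (String × List String)) (l : String) : Bool :=
  ((PySem.Dict.mk d).get? l).isSome
def pvAtoms (d : List (String × List String)) (l : String) : List String :=
  ((PySem.Dict.mk d).get? l).getD []
def pvProper (s t : PySem.Set String) : Bool :=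
  PySem.Set.issubset s t && !(PySem.Set.issubset t s)

-- ===== PORT A =====
-- the pairwise suppression loop ('for a in present_inters: ... for b in present_inters: ...')
def pvSuppressLoop (ila : List (String × List String)) (present : List String)
    (keep : PySem.Set String) : PySem.Set String :=
  present.foldl (fun keep a =>
    let atomsA : PySem.Set String := PySem.Set.ofList (pvAtoms ila a)
    present.foldl (fun keep b =>
      if a == b then keep
      else if pvProper atomsA (PySem.Set.ofList (pvAtoms ila b)) then
        PySem.Set.discard keep a
      else keep) keep) keep

-- the atom-stripping loop ('for inter in list(keep): ...')
def pvStripLoop (ila : List (String × List String)) (L : List String)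
    (keep : PySem.Set String) : PySem.Set String :=
  L.foldl (fun keep inter =>
    if pvHasKey ila inter then
      (pvAtoms ila inter).foldl (fun keep atom => PySem.Set.discard keep atom) keep
    else keep) keep

def filter_maximal_intersections (classes : List (List (String × String))) (intersection_label_to_atomic : List (String × List String)) : List (List (String × String)) :=
  let labels := classes.map pvLab
  let keep0 : PySem.Set String := PySem.Set.ofList labels
  let present := labels.filter (fun lbl => pvHasKey intersection_label_to_atomic lbl)
  let keep1 := pvSuppressLoop intersection_label_to_atomic present keep0
  let keep2 := pvStripLoop intersection_label_to_atomic keep1 keep1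
  classes.filter (fun item => PySem.Set.contains keep2 (pvLab item))

-- ===== PORT B =====
-- atoms = {lbl: frozenset(d[lbl]) for first-seen present labels}
def pvAtomsDict (ila : List (String × List String)) (classes : List (List (String × String))) :
    PySem.Dict String (PySem.Set String) :=
  classes.foldl (fun d item =>
    let lbl := pvLab item
    if !(d.contains lbl) && pvHasKey ila lbl then
      d.insert lbl (PySem.Set.ofList (pvAtoms ila lbl))
    else d) PySem.Dict.empty

-- the single sweep over size-sorted labels, keeping accepted maximal sets
def pvSweep (atoms : PySem.Dict String (PySem.Set String)) (order : List String) :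
    List (PySem.Set String) × PySem.Set String :=
  order.foldl (fun (p : List (PySem.Set String) × PySem.Set String) lbl =>
    let s := PySem.Dict.getD atoms lbl []
    if p.1.any (fun t => pvProper s t) then (p.1, PySem.Set.add p.2 lbl)
    else (p.1 ++ [s], p.2)) ([], PySem.Set.empty)

-- dropped = set(suppressed); then atoms of unsuppressed intersections
def pvDropped (atoms : PySem.Dict String (PySem.Set String)) (sup : PySem.Set String) :
    PySem.Set String :=
  (PySem.Dict.items atoms).foldl (fun dr kv =>
    if !(PySem.Set.contains sup kv.1) then PySem.Set.update dr kv.2 else dr)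
    (PySem.Set.ofList sup)

def filter_maximal_intersections_alt (classes : List (List (String × String))) (intersection_label_to_atomic : List (String × List String)) : List (List (String × String)) :=
  let atoms := pvAtomsDict intersection_label_to_atomic classes
  let order := PySem.List.sorted (PySem.Dict.keys atoms)
      (fun l => (PySem.Dict.getD atoms l []).length) true
  let ms := pvSweep atoms order
  let dropped := pvDropped atoms ms.2
  classes.filter (fun item => !(PySem.Set.contains dropped (pvLab item)))

-- ===== PRECONDITION & SPEC =====
-- Pre_ excludes exactly the inputs where Python A raises KeyError: a class dict without a 'label' key.
def Pre_filter_maximal_intersections (classes : List (List (String × String))) (intersection_label_to_atomic : List (String × List String)) : Prop :=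
  classes.all (fun item => ((PySem.Dict.mk item).get? "label").isSome) = true
instance (classes : List (List (String × String))) (intersection_label_to_atomic : List (String × List String)) : Decidable (Pre_filter_maximal_intersections classes intersection_label_to_atomic) := by unfold Pre_filter_maximal_intersections; infer_instance

def pvWitness_filter_maximal_intersections : (List (List (String × String))) × (List (String × List String)) :=
  ([[("label", "AB")], [("label", "A")]], [("AB", ["a", "b"]), ("A", ["a"])])

def Spec_filter_maximal_intersections (classes : List (List (String × String))) (intersection_label_to_atomic : List (String × List String)) (out : List (List (String × String))) : Prop := out = filter_maximal_intersections_alt classes intersection_label_to_atomic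
instance (classes : List (List (String × String))) (intersection_label_to_atomic : List (String × List String)) (out : List (List (String × String))) : Decidable (Spec_filter_maximal_intersections classes intersection_label_to_atomic out) := by unfold Spec_filter_maximal_intersections; infer_instance

-- ===== CLAIM (what is proved, stated in full; the proofs are below) =====
def Claim_equal_filter_maximal_intersections : Prop := ∀ (classes : List (List (String × String))) (intersection_label_to_atomic : List (String × List String)), Dom_filter_maximal_intersections classes intersection_label_to_atomic → Pre_filter_maximal_intersections classes intersection_label_to_atomic → Spec_filter_maximal_intersections classes intersection_label_to_atomic (filter_maximal_intersections classes intersection_label_to_atomic)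

-- ===== LEMMAS AND PROOFS =====
theorem pv_proper_iff (s t : PySem.Set String) :
    pvProper s t = true ↔ (∀ x ∈ s, x ∈ t) ∧ ¬(∀ x ∈ t, x ∈ s) := by
  constructor
  · intro h
    unfold pvProper at h
    rw [Bool.and_eq_true] at h
    obtain ⟨h1, h2⟩ := h
    rw [PySem.Set.issubset_iff] at h1
    refine ⟨h1, fun hh => ?_⟩
    rw [← PySem.Set.issubset_iff] at hh
    simp [hh] at h2
  · rintro ⟨h1, h2⟩
    unfold pvProper
    rw [Bool.and_eq_true]
    constructor
    · rw [PySem.Set.issubset_iff]; exact h1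
    cases h : PySem.Set.issubset t s
    · simp
    · rw [PySem.Set.issubset_iff] at h
      exact absurd h h2

theorem pv_proper_irrefl (s : PySem.Set String) : pvProper s s = false := by
  simp [pvProper]

theorem pv_proper_trans (s t u : PySem.Set String)
    (h1 : pvProper s t = true) (h2 : pvProper t u = true) : pvProper s u = true := by
  rw [pv_proper_iff] at *
  obtain ⟨h1s, h1n⟩ := h1
  obtain ⟨h2s, h2n⟩ := h2
  exact ⟨fun x hx => h2s x (h1s x hx), fun h => h2n (fun x hx => h1s x (h x hx))⟩

theorem pv_proper_length_lt (s t : PySem.Set String) (hs : s.Nodup) (ht : t.Nodup)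
    (h : pvProper s t = true) : s.length < t.length := by
  rw [pv_proper_iff] at h
  obtain ⟨hsub, hns⟩ := h
  have hsp : List.Subperm s t := List.Nodup.subperm hs (fun {a} ha => hsub a ha)
  rcases lt_or_eq_of_le (List.Subperm.length_le hsp) with h | h
  · exact h
  · exfalso
    have hperm : s.Perm t := List.Subperm.perm_of_length_le hsp (le_of_eq h.symm)
    exact hns (fun x hx => (hperm.mem_iff).mpr hx)

theorem pv_mem_strip_atoms (al : List String) (keep : PySem.Set String) (x : String) :
    x ∈ al.foldl (fun keep atom => PySem.Set.discard keep atom) keep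
    ↔ x ∈ keep ∧ x ∉ al := by
  induction al generalizing keep with
  | nil => simp
  | cons a al ih =>
    simp only [List.foldl_cons]
    rw [ih]
    simp only [PySem.Set.mem_discard, List.mem_cons]
    tauto

theorem pv_mem_strip (ila : List (String × List String)) (L : List String)
    (keep : PySem.Set String) (x : String) :
    x ∈ L.foldl (fun keep inter => if pvHasKey ila inter then
        (pvAtoms ila inter).foldl (fun keep atom => PySem.Set.discard keep atom) keep
      else keep) keep
    ↔ x ∈ keep ∧ ∀ i ∈ L, pvHasKey ila i = true → x ∉ pvAtoms ila i := by
  induction L generalizing keep with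
  | nil => simp
  | cons a L ih =>
    simp only [List.foldl_cons]
    rw [ih]
    have hK : x ∈ (if pvHasKey ila a then
          (pvAtoms ila a).foldl (fun keep atom => PySem.Set.discard keep atom) keep else keep)
        ↔ x ∈ keep ∧ (pvHasKey ila a = true → x ∉ pvAtoms ila a) := by
      split_ifs with h1
      · rw [pv_mem_strip_atoms]; tauto
      · tauto
    rw [hK]
    simp only [List.forall_mem_cons]
    tauto

-- B-side: the atoms dict lookup characterization

theorem pv_atoms_get? (ila : List (String × List String))
    (cs : List (List (String × String))) (d : PySem.Dict String (PySem.Set String)) (l : String) :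
    (cs.foldl (fun d item =>
      let lbl := pvLab item
      if !(d.contains lbl) && pvHasKey ila lbl then
        d.insert lbl (PySem.Set.ofList (pvAtoms ila lbl))
      else d) d).get? l
    = if d.contains l = true then d.get? l
      else if l ∈ cs.map pvLab ∧ pvHasKey ila l = true then
        some (PySem.Set.ofList (pvAtoms ila l)) else none := by
  induction cs generalizing d with
  | nil =>
    simp only [List.foldl_nil]
    by_cases h : d.contains l = true
    · simp [h]
    · rw [if_neg h]
      simp only [List.map_nil, List.not_mem_nil, false_and, if_false]
      rw [PySem.Dict.contains_eq_isSome_get?] at h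
      cases hg : d.get? l
      · rfl
      · rw [hg] at h; simp at h
  | cons c cs ih =>
    simp only [List.foldl_cons]
    rw [ih]
    by_cases hc : d.contains (pvLab c) = true
    · have hins : (!(d.contains (pvLab c)) && pvHasKey ila (pvLab c)) = false := by simp [hc]
      simp only [hins, Bool.false_eq_true, if_false]
      by_cases hl : d.contains l = true
      · simp [hl]
      · simp only [hl]
        have : l ∈ (c :: cs).map pvLab ∧ pvHasKey ila l = true ↔ l ∈ cs.map pvLab ∧ pvHasKey ila l = true := by
          constructor
          · rintro ⟨hm, hk⟩
            rcases (by simpa using hm : l = pvLab c ∨ l ∈ cs.map pvLab) with rfl | hm'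
            · exact absurd hc (by simpa using hl)
            · exact ⟨hm', hk⟩
          · rintro ⟨hm, hk⟩; exact ⟨by simp [hm], hk⟩
        simp only [this]
    · by_cases hk : pvHasKey ila (pvLab c) = true
      · have hins : (!(d.contains (pvLab c)) && pvHasKey ila (pvLab c)) = true := by
          simp [hk]; simpa using hc
        rw [if_pos hins]
        rw [PySem.Dict.contains_insert, PySem.Dict.get?_insert]
        by_cases he : l = pvLab c
        · have hb : (l == pvLab c) = true := beq_iff_eq.mpr he
          have hm : l ∈ (c :: cs).map pvLab := by simp [he]
          simp only [hb, Bool.true_or, if_pos rfl, if_pos he, hm, hk, true_and, he]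
          have hcl : d.contains l = true ↔ False := by rw [he]; simpa using hc
          simp [hcl, hm, hk]
          intro hcc
          exact absurd hcc hc
        · have hb : (l == pvLab c) = false := beq_eq_false_iff_ne.mpr he
          simp only [hb, Bool.false_or, if_neg he]
          have this1 : l ∈ (c :: cs).map pvLab ∧ pvHasKey ila l = true ↔ l ∈ cs.map pvLab ∧ pvHasKey ila l = true := by
            constructor
            · rintro ⟨hm, hkk⟩
              rcases (by simpa using hm : l = pvLab c ∨ l ∈ cs.map pvLab) with rfl | hm'
              · exact absurd rfl he
              · exact ⟨hm', hkk⟩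
            · rintro ⟨hm, hkk⟩; exact ⟨by simp [hm], hkk⟩
          simp only [this1]
      · have hins : (!(d.contains (pvLab c)) && pvHasKey ila (pvLab c)) = false := by
          simp [hk]
        simp only [hins, Bool.false_eq_true, if_false]
        have : l ∈ (c :: cs).map pvLab ∧ pvHasKey ila l = true ↔ l ∈ cs.map pvLab ∧ pvHasKey ila l = true := by
          constructor
          · rintro ⟨hm, hkk⟩
            rcases (by simpa using hm : l = pvLab c ∨ l ∈ cs.map pvLab) with rfl | hm'
            · exact absurd hkk hk
            · exact ⟨hm', hkk⟩
          · rintro ⟨hm, hkk⟩; exact ⟨by simp [hm], hkk⟩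
        simp only [this]

theorem pv_atoms_keys_nodup (ila : List (String × List String))
    (cs : List (List (String × String))) (d : PySem.Dict String (PySem.Set String))
    (hd : d.keys.Nodup) :
    (cs.foldl (fun d item =>
      let lbl := pvLab item
      if !(d.contains lbl) && pvHasKey ila lbl then
        d.insert lbl (PySem.Set.ofList (pvAtoms ila lbl))
      else d) d).keys.Nodup := by
  induction cs generalizing d with
  | nil => exact hd
  | cons c cs ih =>
    simp only [List.foldl_cons]
    apply ih
    split_ifs with h
    · exact PySem.Dict.nodup_keys_insert _ _ _ hd
    · exact hd

-- dropped-set fold characterization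

theorem pv_mem_foldl_update (sup : PySem.Set String) (l : List (String × PySem.Set String))
    (init : PySem.Set String) (x : String) :
    x ∈ l.foldl (fun dr kv => if !(PySem.Set.contains sup kv.1) then PySem.Set.update dr kv.2 else dr) init
    ↔ x ∈ init ∨ ∃ kv ∈ l, PySem.Set.contains sup kv.1 = false ∧ x ∈ kv.2 := by
  induction l generalizing init with
  | nil => simp
  | cons kv l ih =>
    simp only [List.foldl_cons]
    rw [ih]
    have hK : x ∈ (if !(PySem.Set.contains sup kv.1) then PySem.Set.update init kv.2 else init)
        ↔ x ∈ init ∨ (PySem.Set.contains sup kv.1 = false ∧ x ∈ kv.2) := by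
      split_ifs with h1
      · rw [PySem.Set.mem_update]; simp only [Bool.not_eq_true'] at h1; tauto
      · simp only [Bool.not_eq_true', Bool.not_eq_false] at h1
        constructor
        · exact Or.inl
        · rintro (h | ⟨hf, _⟩)
          · exact h
          · rw [h1] at hf; cases hf
    rw [hK]
    simp only [List.exists_mem_cons_iff]
    tauto

theorem pv_mem_inner (a : String) (q : String → Bool) (bs : List String)
    (keep : PySem.Set String) (x : String) :
    x ∈ bs.foldl (fun keep b => if a == b then keep
        else if q b then PySem.Set.discard keep a else keep) keep
    ↔ x ∈ keep ∧ ¬(x = a ∧ ∃ b ∈ bs, a ≠ b ∧ q b = true) := by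
  induction bs generalizing keep with
  | nil => simp
  | cons b bs ih =>
    simp only [List.foldl_cons]
    rw [ih]
    have hK : x ∈ (if a == b then keep else if q b then PySem.Set.discard keep a else keep)
        ↔ x ∈ keep ∧ ¬(x = a ∧ a ≠ b ∧ q b = true) := by
      split_ifs with h1 h2
      · simp only [beq_iff_eq] at h1; subst h1; tauto
      · simp only [beq_iff_eq] at h1
        simp only [PySem.Set.mem_discard]; tauto
      · tauto
    rw [hK]
    simp only [List.exists_mem_cons_iff]
    by_cases hx : x = a <;> simp [hx] <;> tauto

theorem pv_mem_outer (q : String → String → Bool) (bs : List String) (as : List String)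
    (keep : PySem.Set String) (x : String) :
    x ∈ as.foldl (fun keep a => bs.foldl (fun keep b => if a == b then keep
        else if q a b then PySem.Set.discard keep a else keep) keep) keep
    ↔ x ∈ keep ∧ ¬(∃ a ∈ as, x = a ∧ ∃ b ∈ bs, a ≠ b ∧ q a b = true) := by
  induction as generalizing keep with
  | nil => simp
  | cons a as ih =>
    simp only [List.foldl_cons]
    rw [ih, pv_mem_inner]
    simp only [List.exists_mem_cons_iff]
    by_cases hx : x = a <;> simp [hx] <;> tauto

theorem pv_sweep_key (F : String → PySem.Set String) (hFn : ∀ l, (F l).Nodup)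
    (done rest : List String) (r : String)
    (hpair : (done ++ r :: rest).Pairwise (fun a b => (F b).length ≤ (F a).length)) :
    ((done.filter (fun l => !(decide (∃ b ∈ done ++ r :: rest, pvProper (F l) (F b) = true)))).map F).any
      (fun t => pvProper (F r) t)
    = decide (∃ b ∈ done ++ r :: rest, pvProper (F r) (F b) = true) := by
  rw [Bool.eq_iff_iff]
  rw [List.any_eq_true, decide_eq_true_eq]
  constructor
  · rintro ⟨t, ht, hp⟩
    obtain ⟨c, hc, rfl⟩ := List.mem_map.mp ht
    exact ⟨c, List.mem_append_left _ (List.mem_of_mem_filter hc), hp⟩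
  · rintro ⟨b, hb, hp⟩
    have hbc : b ∈ (done ++ r :: rest).filter (fun c => pvProper (F r) (F c)) :=
      List.mem_filter.mpr ⟨hb, hp⟩
    cases hmax : PySem.List.max? ((done ++ r :: rest).filter (fun c => pvProper (F r) (F c)))
        (fun c => (F c).length) with
    | none =>
      rw [PySem.List.max?_eq_none_iff] at hmax
      rw [hmax] at hbc
      cases hbc
    | some m =>
      have hm_mem := PySem.List.max?_mem hmax
      have hmaxall := PySem.List.max?_isMax hmax
      obtain ⟨hm_ord, hm_p⟩ := List.mem_filter.mp hm_mem
      have hnos : ¬∃ u ∈ done ++ r :: rest, pvProper (F m) (F u) = true := by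
        rintro ⟨u, hu, hpu⟩
        have h1 : pvProper (F r) (F u) = true := pv_proper_trans _ _ _ hm_p hpu
        have huc : u ∈ (done ++ r :: rest).filter (fun c => pvProper (F r) (F c)) :=
          List.mem_filter.mpr ⟨hu, h1⟩
        have h2 := hmaxall u huc
        have h3 := pv_proper_length_lt (F m) (F u) (hFn m) (hFn u) hpu
        omega
      have hm_done : m ∈ done := by
        rcases List.mem_append.mp hm_ord with h | h
        · exact h
        · rcases List.mem_cons.mp h with rfl | h
          · rw [pv_proper_irrefl] at hm_p; cases hm_p
          · exfalso
            have hrel : (F m).length ≤ (F r).length :=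
              (List.pairwise_cons.mp (List.pairwise_append.mp hpair).2.1).1 m h
            have := pv_proper_length_lt (F r) (F m) (hFn r) (hFn m) hm_p
            omega
      refine ⟨F m, List.mem_map_of_mem ?_, hm_p⟩
      exact List.mem_filter.mpr ⟨hm_done, by simpa using hnos⟩

theorem pv_sweep (F : String → PySem.Set String) (hFn : ∀ l, (F l).Nodup)
    (ord : List String)
    (hpair : ord.Pairwise (fun a b => (F b).length ≤ (F a).length)) :
    ∀ (rest done : List String), ord = done ++ rest →
    rest.foldl (fun (p : List (PySem.Set String) × PySem.Set String) lbl =>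
        if p.1.any (fun t => pvProper (F lbl) t) then (p.1, PySem.Set.add p.2 lbl)
        else (p.1 ++ [F lbl], p.2))
      ((done.filter (fun l => !(decide (∃ b ∈ ord, pvProper (F l) (F b) = true)))).map F,
       PySem.Set.ofList (done.filter (fun l => decide (∃ b ∈ ord, pvProper (F l) (F b) = true))))
    = ((ord.filter (fun l => !(decide (∃ b ∈ ord, pvProper (F l) (F b) = true)))).map F,
       PySem.Set.ofList (ord.filter (fun l => decide (∃ b ∈ ord, pvProper (F l) (F b) = true)))) := by
  intro rest
  induction rest with
  | nil =>
    intro done h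
    rw [List.append_nil] at h
    subst h
    rfl
  | cons r rest ih =>
    intro done h
    simp only [List.foldl_cons]
    have hkey := pv_sweep_key F hFn done rest r (h ▸ hpair)
    rw [← h] at hkey
    by_cases hsup : ∃ b ∈ ord, pvProper (F r) (F b) = true
    · have hcond : ((done.filter (fun l => !(decide (∃ b ∈ ord, pvProper (F l) (F b) = true)))).map F).any
          (fun t => pvProper (F r) t) = true := by
        rw [hkey]; exact decide_eq_true hsup
      rw [if_pos hcond]
      have e1 : (done ++ [r]).filter (fun l => !(decide (∃ b ∈ ord, pvProper (F l) (F b) = true)))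
          = done.filter (fun l => !(decide (∃ b ∈ ord, pvProper (F l) (F b) = true))) := by
        rw [List.filter_append]
        simp [hsup]
      have e2 : (done ++ [r]).filter (fun l => decide (∃ b ∈ ord, pvProper (F l) (F b) = true))
          = done.filter (fun l => decide (∃ b ∈ ord, pvProper (F l) (F b) = true)) ++ [r] := by
        rw [List.filter_append]
        simp [hsup]
      have := ih (done ++ [r]) (by rw [h, List.append_assoc]; rfl)
      rw [e1, e2, PySem.Set.ofList_append_singleton] at this
      exact this
    · have hcond : ((done.filter (fun l => !(decide (∃ b ∈ ord, pvProper (F l) (F b) = true)))).map F).any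
          (fun t => pvProper (F r) t) = false := by
        rw [hkey]; exact decide_eq_false hsup
      rw [hcond]
      simp only [Bool.false_eq_true, if_false]
      have e1 : (done ++ [r]).filter (fun l => !(decide (∃ b ∈ ord, pvProper (F l) (F b) = true)))
          = done.filter (fun l => !(decide (∃ b ∈ ord, pvProper (F l) (F b) = true))) ++ [r] := by
        rw [List.filter_append]
        simp [hsup]
      have e2 : (done ++ [r]).filter (fun l => decide (∃ b ∈ ord, pvProper (F l) (F b) = true))
          = done.filter (fun l => decide (∃ b ∈ ord, pvProper (F l) (F b) = true)) := by
        rw [List.filter_append]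
        simp [hsup]
      have := ih (done ++ [r]) (by rw [h, List.append_assoc]; rfl)
      rw [e1, e2, List.map_append] at this
      exact this


-- ===== VERDICT (by name: the statement is the Claim_ definition above) =====
theorem filter_maximal_intersections_spec : Claim_equal_filter_maximal_intersections := by
  intro classes ila _hdom _hpre
  unfold Spec_filter_maximal_intersections
  unfold filter_maximal_intersections filter_maximal_intersections_alt
  -- dict characterizations for B's atoms dict
  have hget : ∀ l, (pvAtomsDict ila classes).get? l =
      if l ∈ classes.map pvLab ∧ pvHasKey ila l = true then
        some (PySem.Set.ofList (pvAtoms ila l)) else none := by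
    intro l
    unfold pvAtomsDict
    rw [pv_atoms_get? ila classes PySem.Dict.empty l]
    simp [PySem.Dict.contains_empty]
  have hFdef : ∀ l, PySem.Dict.getD (pvAtomsDict ila classes) l [] =
      if l ∈ classes.map pvLab ∧ pvHasKey ila l = true then
        PySem.Set.ofList (pvAtoms ila l) else [] := by
    intro l
    rw [PySem.Dict.getD_eq_get?_getD, hget l]
    split_ifs <;> rfl
  have hFn : ∀ l, (PySem.Dict.getD (pvAtomsDict ila classes) l []).Nodup := by
    intro l
    rw [hFdef l]
    split_ifs
    · exact PySem.Set.nodup_ofList _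
    · exact List.nodup_nil
  have hnodk : (pvAtomsDict ila classes).keys.Nodup := by
    unfold pvAtomsDict
    exact pv_atoms_keys_nodup ila classes PySem.Dict.empty PySem.Dict.nodup_keys_empty
  have hmemkeys : ∀ l, l ∈ (pvAtomsDict ila classes).keys ↔
      l ∈ classes.map pvLab ∧ pvHasKey ila l = true := by
    intro l
    rw [← PySem.Dict.contains_iff_mem_keys]
    rw [PySem.Dict.contains_eq_isSome_get?, hget l]
    split_ifs with h
    · simpa using h
    · simpa using h
  have hmemord : ∀ l, l ∈ PySem.List.sorted (PySem.Dict.keys (pvAtomsDict ila classes))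
      (fun l => (PySem.Dict.getD (pvAtomsDict ila classes) l []).length) true ↔
      l ∈ classes.map pvLab ∧ pvHasKey ila l = true := by
    intro l
    rw [PySem.List.mem_sorted]
    exact hmemkeys l
  have hpair : (PySem.List.sorted (PySem.Dict.keys (pvAtomsDict ila classes))
      (fun l => (PySem.Dict.getD (pvAtomsDict ila classes) l []).length) true).Pairwise
      (fun a b => (PySem.Dict.getD (pvAtomsDict ila classes) b []).length ≤
                  (PySem.Dict.getD (pvAtomsDict ila classes) a []).length) :=
    PySem.List.sorted_pairwise_rev _ _
  have hsw : pvSweep (pvAtomsDict ila classes) (PySem.List.sorted (PySem.Dict.keys (pvAtomsDict ila classes)) (fun l => (PySem.Dict.getD (pvAtomsDict ila classes) l []).length) true) =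
      (((PySem.List.sorted (PySem.Dict.keys (pvAtomsDict ila classes)) (fun l => (PySem.Dict.getD (pvAtomsDict ila classes) l []).length) true).filter
          (fun l => !(decide (∃ b ∈ PySem.List.sorted (PySem.Dict.keys (pvAtomsDict ila classes)) (fun l => (PySem.Dict.getD (pvAtomsDict ila classes) l []).length) true,
            pvProper (PySem.Dict.getD (pvAtomsDict ila classes) l []) (PySem.Dict.getD (pvAtomsDict ila classes) b []) = true)))).map
          (fun l => PySem.Dict.getD (pvAtomsDict ila classes) l []),
       PySem.Set.ofList ((PySem.List.sorted (PySem.Dict.keys (pvAtomsDict ila classes)) (fun l => (PySem.Dict.getD (pvAtomsDict ila classes) l []).length) true).filter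
          (fun l => decide (∃ b ∈ PySem.List.sorted (PySem.Dict.keys (pvAtomsDict ila classes)) (fun l => (PySem.Dict.getD (pvAtomsDict ila classes) l []).length) true,
            pvProper (PySem.Dict.getD (pvAtomsDict ila classes) l []) (PySem.Dict.getD (pvAtomsDict ila classes) b []) = true)))) := by
    exact pv_sweep (fun l => PySem.Dict.getD (pvAtomsDict ila classes) l []) hFn _ hpair _ [] rfl
  -- membership in B's suppressed set
  have hSup2 : ∀ y, y ∈ (pvSweep (pvAtomsDict ila classes) (PySem.List.sorted (PySem.Dict.keys (pvAtomsDict ila classes)) (fun l => (PySem.Dict.getD (pvAtomsDict ila classes) l []).length) true)).2 ↔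
      (y ∈ classes.map pvLab ∧ pvHasKey ila y = true) ∧
      ∃ b, (b ∈ classes.map pvLab ∧ pvHasKey ila b = true) ∧
        pvProper (PySem.Set.ofList (pvAtoms ila y)) (PySem.Set.ofList (pvAtoms ila b)) = true := by
    intro y
    rw [hsw]
    simp only [PySem.Set.mem_ofList, List.mem_filter, decide_eq_true_eq]
    constructor
    · rintro ⟨hy, b, hb, hp⟩
      have hy' := (hmemord y).mp hy
      have hb' := (hmemord b).mp hb
      rw [hFdef y, if_pos hy', hFdef b, if_pos hb'] at hp
      exact ⟨hy', b, hb', hp⟩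
    · rintro ⟨hy, b, hb, hp⟩
      refine ⟨(hmemord y).mpr hy, b, (hmemord b).mpr hb, ?_⟩
      rw [hFdef y, if_pos hy, hFdef b, if_pos hb]
      exact hp
  -- items of the atoms dict
  have hitems : ∀ kv : String × PySem.Set String, kv ∈ (pvAtomsDict ila classes).items ↔
      (kv.1 ∈ classes.map pvLab ∧ pvHasKey ila kv.1 = true) ∧
      kv.2 = PySem.Set.ofList (pvAtoms ila kv.1) := by
    rintro ⟨k, v⟩
    constructor
    · intro h
      have hg : (pvAtomsDict ila classes).get? k = some v :=
        PySem.Dict.get?_of_mem_items _ h hnodk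
      rw [hget k] at hg
      by_cases hc : k ∈ classes.map pvLab ∧ pvHasKey ila k = true
      · rw [if_pos hc] at hg
        exact ⟨hc, (Option.some_inj.mp hg).symm⟩
      · rw [if_neg hc] at hg
        cases hg
    · rintro ⟨hc, hv⟩
      dsimp only at hc hv
      apply PySem.Dict.mem_items_of_get?_eq_some
      rw [hget k, if_pos hc, hv]
  -- the keep1 set of A
  have hk1 : ∀ y, y ∈ pvSuppressLoop ila ((classes.map pvLab).filter (fun lbl => pvHasKey ila lbl)) (PySem.Set.ofList (classes.map pvLab)) ↔
      y ∈ classes.map pvLab ∧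
      ¬((y ∈ classes.map pvLab ∧ pvHasKey ila y = true) ∧
        ∃ b, (b ∈ classes.map pvLab ∧ pvHasKey ila b = true) ∧
          pvProper (PySem.Set.ofList (pvAtoms ila y)) (PySem.Set.ofList (pvAtoms ila b)) = true) := by
    intro y
    have base : y ∈ pvSuppressLoop ila ((classes.map pvLab).filter (fun lbl => pvHasKey ila lbl)) (PySem.Set.ofList (classes.map pvLab)) ↔
        y ∈ PySem.Set.ofList (classes.map pvLab) ∧
        ¬(∃ a ∈ (classes.map pvLab).filter (fun lbl => pvHasKey ila lbl), y = a ∧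
          ∃ b ∈ (classes.map pvLab).filter (fun lbl => pvHasKey ila lbl), a ≠ b ∧
            pvProper (PySem.Set.ofList (pvAtoms ila a)) (PySem.Set.ofList (pvAtoms ila b)) = true) :=
      pv_mem_outer (fun a b => pvProper (PySem.Set.ofList (pvAtoms ila a)) (PySem.Set.ofList (pvAtoms ila b)))
        ((classes.map pvLab).filter (fun lbl => pvHasKey ila lbl))
        ((classes.map pvLab).filter (fun lbl => pvHasKey ila lbl))
        (PySem.Set.ofList (classes.map pvLab)) y
    rw [base, PySem.Set.mem_ofList]
    constructor
    · rintro ⟨hy, hn⟩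
      refine ⟨hy, ?_⟩
      rintro ⟨⟨hyl, hyk⟩, b, ⟨hbl, hbk⟩, hp⟩
      have hyb : y ≠ b := by
        rintro rfl
        rw [pv_proper_irrefl] at hp
        cases hp
      exact hn ⟨y, List.mem_filter.mpr ⟨hyl, hyk⟩, rfl, b, List.mem_filter.mpr ⟨hbl, hbk⟩, hyb, hp⟩
    · rintro ⟨hy, hn⟩
      refine ⟨hy, ?_⟩
      rintro ⟨a, ha, rfl, b, hb, _hab, hp⟩
      obtain ⟨hal, hak⟩ := List.mem_filter.mp ha
      obtain ⟨hbl, hbk⟩ := List.mem_filter.mp hb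
      exact hn ⟨⟨hal, hak⟩, b, ⟨hbl, hbk⟩, hp⟩
  -- now compare the two filters
  refine List.filter_congr ?_
  intro item hitem
  have hx : pvLab item ∈ classes.map pvLab := List.mem_map_of_mem hitem
  have hiff : PySem.Set.contains (pvStripLoop ila
        (pvSuppressLoop ila ((classes.map pvLab).filter (fun lbl => pvHasKey ila lbl)) (PySem.Set.ofList (classes.map pvLab)))
        (pvSuppressLoop ila ((classes.map pvLab).filter (fun lbl => pvHasKey ila lbl)) (PySem.Set.ofList (classes.map pvLab)))) (pvLab item) = true ↔
      ¬(PySem.Set.contains (pvDropped (pvAtomsDict ila classes)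
          (pvSweep (pvAtomsDict ila classes) (PySem.List.sorted (PySem.Dict.keys (pvAtomsDict ila classes)) (fun l => (PySem.Dict.getD (pvAtomsDict ila classes) l []).length) true)).2) (pvLab item) = true) := by
    rw [PySem.Set.contains_iff, PySem.Set.contains_iff]
    unfold pvStripLoop
    have hstrip := pv_mem_strip ila
      (pvSuppressLoop ila ((classes.map pvLab).filter (fun lbl => pvHasKey ila lbl)) (PySem.Set.ofList (classes.map pvLab)))
      (pvSuppressLoop ila ((classes.map pvLab).filter (fun lbl => pvHasKey ila lbl)) (PySem.Set.ofList (classes.map pvLab)))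
      (pvLab item)
    have hdrop : pvLab item ∈ pvDropped (pvAtomsDict ila classes)
          (pvSweep (pvAtomsDict ila classes) (PySem.List.sorted (PySem.Dict.keys (pvAtomsDict ila classes)) (fun l => (PySem.Dict.getD (pvAtomsDict ila classes) l []).length) true)).2 ↔
        pvLab item ∈ (pvSweep (pvAtomsDict ila classes) (PySem.List.sorted (PySem.Dict.keys (pvAtomsDict ila classes)) (fun l => (PySem.Dict.getD (pvAtomsDict ila classes) l []).length) true)).2 ∨
        ∃ kv ∈ (pvAtomsDict ila classes).items,
          PySem.Set.contains (pvSweep (pvAtomsDict ila classes) (PySem.List.sorted (PySem.Dict.keys (pvAtomsDict ila classes)) (fun l => (PySem.Dict.getD (pvAtomsDict ila classes) l []).length) true)).2 kv.1 = false ∧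
          pvLab item ∈ kv.2 := by
      unfold pvDropped
      rw [pv_mem_foldl_update]
      rw [PySem.Set.mem_ofList]
    rw [hstrip, hdrop]
    have hcontra : ∀ k, PySem.Set.contains (pvSweep (pvAtomsDict ila classes) (PySem.List.sorted (PySem.Dict.keys (pvAtomsDict ila classes)) (fun l => (PySem.Dict.getD (pvAtomsDict ila classes) l []).length) true)).2 k = false ↔
        ¬((k ∈ classes.map pvLab ∧ pvHasKey ila k = true) ∧
          ∃ b, (b ∈ classes.map pvLab ∧ pvHasKey ila b = true) ∧
            pvProper (PySem.Set.ofList (pvAtoms ila k)) (PySem.Set.ofList (pvAtoms ila b)) = true) := by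
      intro k
      rw [← hSup2 k, ← PySem.Set.contains_iff]
      cases h : PySem.Set.contains (pvSweep (pvAtomsDict ila classes) (PySem.List.sorted (PySem.Dict.keys (pvAtomsDict ila classes)) (fun l => (PySem.Dict.getD (pvAtomsDict ila classes) l []).length) true)).2 k <;> simp
    constructor
    · rintro ⟨hkeep1, hall⟩
      obtain ⟨_hxl, hnsx⟩ := (hk1 _).mp hkeep1
      rintro (hsup | ⟨kv, hkvmem, hkvns, hkvx⟩)
      · exact hnsx ((hSup2 _).mp hsup)
      · obtain ⟨⟨hkl, hkk⟩, hkv2⟩ := (hitems kv).mp hkvmem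
        have hns := (hcontra kv.1).mp hkvns
        have hk1mem : kv.1 ∈ pvSuppressLoop ila ((classes.map pvLab).filter (fun lbl => pvHasKey ila lbl)) (PySem.Set.ofList (classes.map pvLab)) :=
          (hk1 kv.1).mpr ⟨hkl, hns⟩
        apply hall kv.1 hk1mem hkk
        rw [hkv2, PySem.Set.mem_ofList] at hkvx
        exact hkvx
    · intro hnd
      have hnsx : ¬((pvLab item ∈ classes.map pvLab ∧ pvHasKey ila (pvLab item) = true) ∧
          ∃ b, (b ∈ classes.map pvLab ∧ pvHasKey ila b = true) ∧
            pvProper (PySem.Set.ofList (pvAtoms ila (pvLab item))) (PySem.Set.ofList (pvAtoms ila b)) = true) :=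
        fun hs => hnd (Or.inl ((hSup2 _).mpr hs))
      refine ⟨(hk1 _).mpr ⟨hx, hnsx⟩, ?_⟩
      intro i hi hik hxa
      obtain ⟨hil, hins⟩ := (hk1 i).mp hi
      refine hnd (Or.inr ⟨(i, PySem.Set.ofList (pvAtoms ila i)), ?_, ?_, ?_⟩)
      · exact (hitems (i, PySem.Set.ofList (pvAtoms ila i))).mpr ⟨⟨hil, hik⟩, rfl⟩
      · exact (hcontra i).mpr hins
      · rw [PySem.Set.mem_ofList]; exact hxa
  cases h1 : PySem.Set.contains (pvStripLoop ila
        (pvSuppressLoop ila ((classes.map pvLab).filter (fun lbl => pvHasKey ila lbl)) (PySem.Set.ofList (classes.map pvLab)))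
        (pvSuppressLoop ila ((classes.map pvLab).filter (fun lbl => pvHasKey ila lbl)) (PySem.Set.ofList (classes.map pvLab)))) (pvLab item) <;>
    cases h2 : PySem.Set.contains (pvDropped (pvAtomsDict ila classes)
          (pvSweep (pvAtomsDict ila classes) (PySem.List.sorted (PySem.Dict.keys (pvAtomsDict ila classes)) (fun l => (PySem.Dict.getD (pvAtomsDict ila classes) l []).length) true)).2) (pvLab item) <;>
    simp_all
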